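-- pv_equiv track=rewrite | github.com/imn00133/algorithm | BaekJoonCodePlus/600Graph/Challenge/baekjoon_16964.py | validation_check
-- ===== SOURCE A (Python) =====
-- def validation_check(tree, ans):
--     check = [False for _ in range(len(tree))]
--     stack = []
--     ans_index = 0
--     node = ans[ans_index]
--     # 처음이 1이 아니면 무조건 틀린다.
--     if node != 1:
--         return 0
--     check[node] = True
--     stack.append(node)
--     while stack:
--         node = stack.pop()
--         next_node = ans[ans_index + 1]
--         # node의 간선에 next_node가 없으면 pop을 버리고 이전으로
--         if next_node not in tree[node]:
--             continue
--         check[next_node] = True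
--         ans_index += 1
--         # ans를 다 확인하였으면 종료
--         if ans_index == len(ans) - 1:
--             return 1
--         stack.append(node)
--         stack.append(next_node)
--     # 다 확인하지 못했으면 오류가 있다.
--     # 이를 check[1:]로 하든, 아니든 0.04ms밖에 차이가 나지 않는다.
--     # O(n)이 더 추가되었는데 흐음..?
--     return 0
-- ===== SOURCE B (Python) =====
-- def validation_check(tree, ans):
--     if ans[0] != 1:
--         return 0
--     n = len(ans)
--     idx = 0
--
--     def visit(node):
--         # loop: try to match ans[idx+1] as a child of node; on failure backtrack
--         nonlocal idx
--         while True: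
--             next_node = ans[idx + 1]
--             if next_node not in tree[node]:
--                 return False
--             idx += 1
--             if idx == n - 1:
--                 return True
--             if visit(next_node):
--                 return True
--
--     return 1 if visit(1) else 0
-- ===== Notes on version B (the rewrite author's own statement) =====
-- stated objective: alternative
-- what changed: Replaces A's explicit stack loop (with a write-only visited array) by recursion over the tree with a shared index: a helper visit(node) loops matching ans[idx+1] against node's adjacency, recursing on a match and backtracking to the parent on failure.
-- outside the precondition, e.g. on validation_check([[], []], [1, 5]): A returns 0, B returns 0
import Mathlib
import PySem

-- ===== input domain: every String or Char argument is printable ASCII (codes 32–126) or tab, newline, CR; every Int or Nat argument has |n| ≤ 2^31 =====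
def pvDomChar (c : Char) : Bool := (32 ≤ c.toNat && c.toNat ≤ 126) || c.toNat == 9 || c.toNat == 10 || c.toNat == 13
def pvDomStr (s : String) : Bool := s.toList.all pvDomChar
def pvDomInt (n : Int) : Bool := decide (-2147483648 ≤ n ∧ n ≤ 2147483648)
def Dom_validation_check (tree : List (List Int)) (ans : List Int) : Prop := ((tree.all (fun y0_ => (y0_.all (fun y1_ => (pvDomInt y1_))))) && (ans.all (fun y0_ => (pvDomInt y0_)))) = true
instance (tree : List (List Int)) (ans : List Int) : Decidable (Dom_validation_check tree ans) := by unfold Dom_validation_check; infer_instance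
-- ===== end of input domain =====

-- B replaces A's explicit stack loop by recursion over the tree with a shared index (same cost, different decomposition).


-- ===== PORT A =====
-- A's while-loop over (check, stack, ans_index); fuel is a totality guard only
-- (2*|ans|+2 bounds the iteration count: each iteration pops one element, and at
-- most 1 + 2*(|ans|-2) elements are ever pushed). ans_index is kept as a Nat
-- (Python's ans_index is a nonnegative counter). Python's IndexError paths
-- (ans[i+1], tree[node], check[next] out of range) are excluded by Pre_; on them
-- the port returns 0 / leaves check unchanged (pySetD).
def loopA (tree : List (List Int)) (ans : List Int) : Nat → List Bool → List Int → Nat → Int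
  | _, _, [], _ => 0                    -- while stack: exhausted → return 0
  | 0, _, _ :: _, _ => 0                -- fuel guard (unreachable under Pre_)
  | f + 1, check, node :: rest, ansIndex =>
    match PySem.List.pyGet? ans ((ansIndex : Int) + 1) with
    | none => 0                         -- IndexError (excluded by Pre_)
    | some next =>
      match PySem.List.pyGet? tree node with
      | none => 0                       -- IndexError (excluded by Pre_)
      | some adj =>
        if adj.contains next then
          let check' := PySem.List.pySetD check next true
          let ansIndex' := ansIndex + 1
          if ansIndex' = ans.length - 1 then 1
          else loopA tree ans f check' (next :: node :: rest) ansIndex'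
        else loopA tree ans f check rest ansIndex

def validation_check (tree : List (List Int)) (ans : List Int) : Int :=
  match PySem.List.pyGet? ans 0 with
  | none => 0                           -- ans = []: IndexError (excluded by Pre_)
  | some node =>
    if node ≠ 1 then 0
    else
      let check := PySem.List.pySetD (List.replicate tree.length false) node true
      loopA tree ans (2 * ans.length + 2) check [node] 0

-- ===== PORT B =====
-- B's visit(node): loop matching ans[idx+1] against tree[node]; recursion on a
-- match, backtrack (return false) otherwise. The shared mutable idx is threaded
-- through as state, together with the remaining fuel (a totality guard only;
-- one unit per loop iteration). Returns (done, fuel', idx').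
def visitB (tree : List (List Int)) (ans : List Int) : Nat → Int → Nat → Bool × Nat × Nat
  | 0, _, idx => (false, 0, idx)        -- fuel guard (unreachable under Pre_)
  | f + 1, node, idx =>
    match PySem.List.pyGet? ans ((idx : Int) + 1), PySem.List.pyGet? tree node with
    | some next, some adj =>
      if adj.contains next then
        if idx + 1 = ans.length - 1 then (true, f, idx + 1)
        else
          match visitB tree ans f next (idx + 1) with
          | (true, f', i) => (true, f', i)
          | (false, f', i) =>
            if _h : f' < f + 1 then visitB tree ans f' node i   -- continue the while-loop
            else (false, 0, i)          -- fuel guard branch (never taken: f' ≤ f)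
      else (false, f, idx)              -- next_node not in tree[node]: backtrack
    | _, _ => (false, f, idx)           -- IndexError in Python (excluded by Pre_)

def validation_check_alt (tree : List (List Int)) (ans : List Int) : Int :=
  match PySem.List.pyGet? ans 0 with
  | none => 0                           -- ans = []: IndexError (excluded by Pre_)
  | some h0 =>
    if h0 ≠ 1 then 0
    else if (visitB tree ans (2 * ans.length + 2) 1 0).1 then 1 else 0

-- ===== PRECONDITION & SPEC =====
-- Pre_ excludes exactly the inputs on which A raises IndexError (empty ans;
-- ans starting with 1 but of length 1; ans starting with 1 containing an element
-- outside [-len(tree), len(tree)), where an out-of-range read/write of ans/tree/check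
-- can occur).  This is slightly wider than the exact raising set: when an
-- out-of-range element of ans is never matched against an adjacency list, A still
-- returns 0 — and B returns 0 there too (see claim cites).
def Pre_validation_check (tree : List (List Int)) (ans : List Int) : Prop :=
  ans ≠ [] ∧ (ans.headI = 1 → 2 ≤ ans.length ∧ ∀ x ∈ ans, -(tree.length : Int) ≤ x ∧ x < tree.length)
instance (tree : List (List Int)) (ans : List Int) : Decidable (Pre_validation_check tree ans) := by
  unfold Pre_validation_check; infer_instance

def pvWitness_validation_check : List (List Int) × List Int := ([[1], [0, 2], [1]], [1, 2])

def Spec_validation_check (tree : List (List Int)) (ans : List Int) (out : Int) : Prop := out = validation_check_alt tree ans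
instance (tree : List (List Int)) (ans : List Int) (out : Int) : Decidable (Spec_validation_check tree ans out) := by unfold Spec_validation_check; infer_instance

-- ===== CLAIM (what is proved, stated in full; the proofs are below) =====
def Claim_equal_validation_check : Prop := ∀ (tree : List (List Int)) (ans : List Int), Dom_validation_check tree ans → Pre_validation_check tree ans → Spec_validation_check tree ans (validation_check tree ans)

-- ===== LEMMAS AND PROOFS =====

-- the visited array never influences A's result
theorem loopA_check_irrel (tree : List (List Int)) (ans : List Int) :
    ∀ (f : Nat) (c₁ c₂ : List Bool) (st : List Int) (i : Nat),
      loopA tree ans f c₁ st i = loopA tree ans f c₂ st i := by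
  intro f
  induction f with
  | zero => intro c₁ c₂ st i; cases st <;> simp [loopA]
  | succ f ih =>
    intro c₁ c₂ st i
    cases st with
    | nil => simp [loopA]
    | cons node rest =>
      unfold loopA
      cases h1 : PySem.List.pyGet? ans ((i : Int) + 1) with
      | none => rfl
      | some next =>
        cases h2 : PySem.List.pyGet? tree node with
        | none => rfl
        | some adj =>
          by_cases hc : adj.contains next
          · simp only [hc, if_true]
            by_cases he : i + 1 = ans.length - 1
            · simp [he]
            · simp only [he, if_false]
              exact ih _ _ _ _
          · simp only [hc]
            exact ih _ _ _ _

-- visitB only consumes fuel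
theorem visitB_fuel_le (tree : List (List Int)) (ans : List Int) :
    ∀ (f : Nat) (node : Int) (idx : Nat), (visitB tree ans f node idx).2.1 ≤ f := by
  intro f
  induction f using Nat.strong_induction_on with
  | _ f ih =>
    intro node idx
    match f with
    | 0 => simp [visitB]
    | g + 1 =>
      unfold visitB
      cases h1 : PySem.List.pyGet? ans ((idx : Int) + 1) with
      | none => simp
      | some next =>
        cases h2 : PySem.List.pyGet? tree node with
        | none => simp
        | some adj =>
          by_cases hc : adj.contains next
          · simp only [hc, if_true]
            by_cases he : idx + 1 = ans.length - 1
            · simp [he]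
            · simp only [he, if_false]
              cases hv : visitB tree ans g next (idx + 1) with
              | mk done rest =>
                cases rest with
                | mk f' i =>
                  cases done
                  · simp only
                    split
                    · next hlt => exact le_trans (ih f' hlt node i) (by omega)
                    · simp
                  · have := ih g (by omega) next (idx + 1)
                    rw [hv] at this
                    simpa using le_trans this (by omega)
          · have hc' : next ∉ adj := by simpa using hc
            simp [hc']

-- if the next read of ans fails, A's loop returns 0 from any state
theorem loopA_eq_zero_of_get_none (tree : List (List Int)) (ans : List Int)
    (f : Nat) (c : List Bool) (st : List Int) (i : Nat)
    (h : PySem.List.pyGet? ans ((i : Int) + 1) = none) :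
    loopA tree ans f c st i = 0 := by
  match f, st with
  | f, [] => simp [loopA]
  | 0, _ :: _ => simp [loopA]
  | f + 1, node :: rest => unfold loopA; rw [h]

-- lockstep: one frame of A's stack is one activation of B's visit
theorem loopA_eq_visitB (tree : List (List Int)) (ans : List Int)
    (hans : ∀ x ∈ ans, -(tree.length : Int) ≤ x ∧ x < tree.length) :
    ∀ (f : Nat) (node : Int) (st : List Int) (c : List Bool) (idx : Nat),
      (-(tree.length : Int) ≤ node ∧ node < tree.length) →
      (∀ m ∈ st, -(tree.length : Int) ≤ m ∧ m < tree.length) →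
      loopA tree ans f c (node :: st) idx =
        (match visitB tree ans f node idx with
         | (true, _, _) => 1
         | (false, f', i) => loopA tree ans f' c st i) := by
  intro f
  induction f using Nat.strong_induction_on with
  | _ f ih =>
    intro node st c idx hnode hst
    match f with
    | 0 =>
      cases st <;> simp [loopA, visitB]
    | g + 1 =>
      conv_lhs => rw [loopA]
      conv_rhs => rw [visitB]
      cases h1 : PySem.List.pyGet? ans ((idx : Int) + 1) with
      | none =>
        simp only []
        rw [loopA_eq_zero_of_get_none tree ans g c st idx h1]
      | some next =>
        cases h2 : PySem.List.pyGet? tree node with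
        | none =>
          exfalso
          rw [PySem.List.pyGet?_eq_none_iff] at h2
          exact h2 hnode
        | some adj =>
          simp only []
          by_cases hc : adj.contains next
          · simp only [hc, if_true]
            by_cases he : idx + 1 = ans.length - 1
            · simp [he]
            · simp only [he, if_false]
              have hnext : -(tree.length : Int) ≤ next ∧ next < tree.length :=
                hans next (PySem.List.mem_of_pyGet?_eq_some ans h1)
              rw [ih g (by omega) next (node :: st) (PySem.List.pySetD c next true) (idx + 1)
                    hnext (by intro m hm; cases hm with
                              | head => exact hnode
                              | tail _ hm => exact hst m hm)]
              cases hv : visitB tree ans g next (idx + 1) with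
              | mk done rest =>
                cases rest with
                | mk f' i =>
                  cases done
                  · simp only
                    have hf' : f' ≤ g := by
                      have := visitB_fuel_le tree ans g next (idx + 1)
                      rw [hv] at this; simpa using this
                    rw [dif_pos (by omega : f' < g + 1)]
                    rw [ih f' (by omega) node st (PySem.List.pySetD c next true) i hnode hst]
                    cases hv2 : visitB tree ans f' node i with
                    | mk done2 rest2 =>
                      cases rest2 with
                      | mk f'' i'' =>
                        cases done2
                        · simp only
                          exact loopA_check_irrel tree ans f'' _ c st i''
                        · rfl
                  · rfl
          · have hc' : next ∉ adj := by simpa using hc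
            simp [hc']

-- ===== VERDICT (by name: the statement is the Claim_ definition above) =====
theorem validation_check_spec : Claim_equal_validation_check := by
  intro tree ans _hdom hpre
  obtain ⟨hne, hhead⟩ := hpre
  unfold Spec_validation_check validation_check validation_check_alt
  cases ans with
  | nil => exact absurd rfl hne
  | cons a rest =>
    rw [PySem.List.pyGet?_zero_cons]
    by_cases ha : a = 1
    · subst ha
      obtain ⟨_hlen, hall⟩ := hhead (by simp)
      have h1 : -((tree.length : Int)) ≤ 1 ∧ (1 : Int) < tree.length := hall 1 (by simp)
      simp only [ne_eq, not_true_eq_false, if_false]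
      rw [loopA_eq_visitB tree (1 :: rest) hall (2 * (1 :: rest).length + 2) 1 []
            (PySem.List.pySetD (List.replicate tree.length false) 1 true) 0 h1 (by simp)]
      cases hv : visitB tree (1 :: rest) (2 * (1 :: rest).length + 2) 1 0 with
      | mk done pr =>
        cases pr with
        | mk f' i =>
          cases done
          · simp [loopA]
          · simp
    · simp [ha]
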